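-- pv_equiv track=rewrite | github.com/bachdohoanggia/LeetCode | array/convert-an-array-into-a-2d-array-with-conditions.py | findMatrix
-- ===== SOURCE A (Python) =====
-- from typing import List
--
-- def findMatrix(nums: List[int]) -> List[List[int]]:
--     freq = {}
--     for num in nums:
--         freq[num] = freq.get(num, 0) + 1
--     max_freq = max(freq.values())
--     arr = [[] for _ in range(max_freq)]
--     for num, count in freq.items():
--         for i in range(count):
--             arr[i].append(num)
--     return arr
-- ===== SOURCE B (Python) =====
-- from typing import List
--
-- def findMatrix(nums: List[int]) -> List[List[int]]:
--     remaining = {}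
--     for num in nums:
--         remaining[num] = remaining.get(num, 0) + 1
--     rounds = max(remaining.values())
--     result = []
--     for _ in range(rounds):
--         row = [num for num, c in remaining.items() if c > 0]
--         result.append(row)
--         for num in row:
--             remaining[num] -= 1
--     return result
-- ===== Notes on version B (the rewrite author's own statement) =====
-- stated objective: alternative
-- what changed: Instead of pre-allocating max_freq rows and distributing each key into rows 0..count-1, B peels one layer per round: it loops max_freq times, each round collecting every key with positive remaining count into a new row and decrementing those counts.
import Mathlib
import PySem

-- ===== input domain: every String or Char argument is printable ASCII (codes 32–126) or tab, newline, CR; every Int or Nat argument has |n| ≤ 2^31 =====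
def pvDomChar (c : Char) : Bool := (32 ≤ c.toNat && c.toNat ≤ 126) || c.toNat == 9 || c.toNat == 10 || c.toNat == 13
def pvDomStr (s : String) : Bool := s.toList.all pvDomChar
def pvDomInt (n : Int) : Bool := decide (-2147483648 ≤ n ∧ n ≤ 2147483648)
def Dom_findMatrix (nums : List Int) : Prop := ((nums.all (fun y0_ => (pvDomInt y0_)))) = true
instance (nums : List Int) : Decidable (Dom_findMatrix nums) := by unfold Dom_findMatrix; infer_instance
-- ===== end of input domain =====

-- B replaces A's place-each-key-into-rows-0..count-1 distribution by a round-by-round layer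
-- extraction that decrements remaining counts (objective: alternative, same cost).

-- ===== PORT A =====
-- arr[i].append(num): i is always a valid non-negative index in A's loop, so the none branch is unreachable
def pvAppendAt (arr : List (List Int)) (i : Int) (num : Int) : List (List Int) :=
  match PySem.List.pyGet? arr i with
  | some row => arr.set i.toNat (row ++ [num])
  | none => arr

def findMatrix (nums : List Int) : List (List Int) :=
  let freq := nums.foldl (fun d num => d.insert num (d.getD num 0 + 1)) PySem.Dict.empty
  match PySem.List.max? freq.values (fun v => v) with
  | none => []  -- Python raises ValueError here (nums = []); excluded by Pre_findMatrix
  | some maxFreq =>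
    let arr := (PySem.List.pyRange 0 maxFreq 1).map (fun _ => ([] : List Int))
    freq.items.foldl (fun arr p =>
      (PySem.List.pyRange 0 p.2 1).foldl (fun arr i => pvAppendAt arr i p.1) arr) arr

-- ===== PORT B =====
def findMatrix_alt (nums : List Int) : List (List Int) :=
  let remaining := nums.foldl (fun d num => d.insert num (d.getD num 0 + 1)) PySem.Dict.empty
  match PySem.List.max? remaining.values (fun v => v) with
  | none => []  -- Python raises ValueError here (nums = []); excluded by Pre_findMatrix
  | some rounds =>
    (((PySem.List.pyRange 0 rounds 1).foldl
      (fun (st : List (List Int) × PySem.Dict Int Int) _ =>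
        let row := (st.2.items.filter (fun p => 0 < p.2)).map (·.1)
        (st.1 ++ [row], row.foldl (fun d num => d.modify num 0 (· - 1)) st.2))
      ([], remaining))).1

-- ===== PRECONDITION & SPEC =====
-- Both programs raise ValueError (max() of an empty sequence) on the empty list; excluded.
def Pre_findMatrix (nums : List Int) : Prop := nums ≠ []
instance (nums : List Int) : Decidable (Pre_findMatrix nums) := by unfold Pre_findMatrix; infer_instance
def pvWitness_findMatrix : List Int := ([1, 2, 2, 3])

def Spec_findMatrix (nums : List Int) (out : List (List Int)) : Prop := out = findMatrix_alt nums
instance (nums : List Int) (out : List (List Int)) : Decidable (Spec_findMatrix nums out) := by unfold Spec_findMatrix; infer_instance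

-- ===== CLAIM (what is proved, stated in full; the proofs are below) =====
def Claim_equal_findMatrix : Prop := ∀ (nums : List Int), Dom_findMatrix nums → Pre_findMatrix nums → Spec_findMatrix nums (findMatrix nums)

-- ===== LEMMAS AND PROOFS =====

-- the common value both programs compute: row i holds the distinct elements occurring more than i times
def pvRow (nums : List Int) (i : Nat) : List Int :=
  (PySem.Set.ofList nums).filter (fun k => (i : Int) < (nums.count k : Int))

def pvRows (nums : List Int) (m : Nat) : List (List Int) :=
  (List.range m).map (pvRow nums)

-- B's remaining-count dict after n rounds
def pvDec (nums : List Int) (n : Nat) : PySem.Dict Int Int :=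
  PySem.Dict.mk ((PySem.Set.ofList nums).map (fun k => (k, max ((nums.count k : Int) - n) 0)))

-- ----- A side -----

theorem pvAppendAt_natCast (arr : List (List Int)) (n : Nat) (num : Int) (h : n < arr.length) :
    pvAppendAt arr (n : Int) num = arr.set n (arr[n] ++ [num]) := by
  unfold pvAppendAt
  rw [PySem.List.pyGet?_natCast, List.getElem?_eq_getElem h]
  simp

theorem pvInner_nat (num : Int) : ∀ (n : Nat) (arr : List (List Int)), n ≤ arr.length →
    (PySem.List.pyRange 0 n 1).foldl (fun a i => pvAppendAt a i num) arr
    = arr.mapIdx (fun k row => if k < n then row ++ [num] else row) := by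
  intro n
  induction n with
  | zero =>
    intro arr _
    simp
    apply List.ext_getElem <;> simp
  | succ n ih =>
    intro arr h
    rw [show ((n + 1 : Nat) : Int) = (n : Int) + 1 by push_cast; ring,
        PySem.List.pyRange_one_succ_right (show (0:Int) ≤ (n:Int) by omega), List.foldl_append]
    rw [ih arr (by omega)]
    simp only [List.foldl_cons, List.foldl_nil]
    have hn : n < arr.length := by omega
    rw [pvAppendAt_natCast _ _ _ (by simpa using hn)]
    apply List.ext_getElem
    · simp
    · intro j hj1 hj2
      simp only [List.getElem_set, List.getElem_mapIdx]
      split_ifs <;> try rfl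
      all_goals (try omega)
      all_goals simp_all
      all_goals omega

theorem pvInner_int (num : Int) (c : Int) (arr : List (List Int)) (h : c ≤ (arr.length : Int)) :
    (PySem.List.pyRange 0 c 1).foldl (fun a i => pvAppendAt a i num) arr
    = arr.mapIdx (fun k row => if (k : Int) < c then row ++ [num] else row) := by
  by_cases hc : c ≤ 0
  · rw [PySem.List.pyRange_one_eq_nil hc, List.foldl_nil]
    apply List.ext_getElem
    · simp
    · intro j hj1 hj2
      simp only [List.getElem_mapIdx]
      rw [if_neg (by omega)]
  · have hc' : c = ((c.toNat : Nat) : Int) := by omega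
    rw [hc', pvInner_nat num c.toNat arr (by omega)]
    apply List.ext_getElem
    · simp
    · intro j hj1 hj2
      simp only [List.getElem_mapIdx]
      split_ifs <;> first | rfl | omega

theorem pvOuter_eq : ∀ (L : List (Int × Int)) (arr : List (List Int)),
    (∀ p ∈ L, p.2 ≤ (arr.length : Int)) →
    L.foldl (fun a p => (PySem.List.pyRange 0 p.2 1).foldl (fun a i => pvAppendAt a i p.1) a) arr
    = arr.mapIdx (fun k row => row ++ (L.filter (fun p => (k : Int) < p.2)).map (·.1)) := by
  intro L
  induction L with
  | nil =>
    intro arr _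
    apply List.ext_getElem <;> simp
  | cons p L ih =>
    intro arr h
    rw [List.foldl_cons, pvInner_int p.1 p.2 arr (h p (by simp)),
        ih _ (by intro q hq; simpa using h q (by simp [hq]))]
    apply List.ext_getElem
    · simp
    · intro j hj1 hj2
      simp only [List.getElem_mapIdx, List.filter_cons]
      by_cases hj : (j : Int) < p.2
      · simp [hj]
      · simp [hj]

theorem pvLemA (nums : List Int) (mf : Int)
    (hmax : PySem.List.max? (PySem.Dict.counter nums).values (fun v => v) = some mf) :
    findMatrix nums = pvRows nums mf.toNat := by
  have hvals : (PySem.Dict.counter nums).values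
      = (PySem.Set.ofList nums).map (fun k => ((nums.count k : Int))) := by
    show (PySem.Dict.counter nums).items.map (·.2) = _
    rw [PySem.Dict.items_counter, List.map_map]
    rfl
  have h0mf : 0 ≤ mf := by
    have hm := PySem.List.max?_mem hmax
    rw [hvals] at hm
    obtain ⟨k, _, hk⟩ := List.mem_map.mp hm
    subst hk
    positivity
  have hle : ∀ p ∈ (PySem.Dict.counter nums).items, p.2 ≤ mf := by
    intro p hp
    exact PySem.List.max?_isMax hmax p.2 (List.mem_map_of_mem hp)
  simp only [findMatrix, PySem.Dict.foldl_insert_getD_add_one_eq_counter, hmax]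
  rw [pvOuter_eq _ _ (by
    intro p hp
    have := hle p hp
    simp only [List.length_map, PySem.List.length_pyRange_one]
    omega)]
  apply List.ext_getElem
  · simp [pvRows, PySem.List.length_pyRange_one]
  · intro j hj1 hj2
    simp only [List.getElem_mapIdx, List.getElem_map, pvRows, List.getElem_range, List.nil_append]
    show _ = pvRow nums j
    rw [PySem.Dict.items_counter, List.filter_map, List.map_map]
    rw [show ((fun (x : Int × Int) => x.1) ∘ fun k => (k, ((nums.count k : Int)))) = id by rfl, List.map_id]
    rfl

-- ----- B side -----

theorem pvItems_pvDec (nums : List Int) (n : Nat) :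
    (pvDec nums n).items = (PySem.Set.ofList nums).map (fun k => (k, max ((nums.count k : Int) - n) 0)) := rfl

theorem pvKeys_pvDec (nums : List Int) (n : Nat) :
    (pvDec nums n).keys = PySem.Set.ofList nums := by
  show ((PySem.Set.ofList nums).map (fun k => (k, max ((nums.count k : Int) - n) 0))).map (·.1) = _
  rw [List.map_map]
  exact ((List.map_congr_left (fun k _ => rfl)).trans (List.map_id _))

theorem pvGetD_foldl_sub : ∀ (ks : List Int) (d : PySem.Dict Int Int) (k : Int),
    (ks.foldl (fun d x => d.modify x 0 (· - 1)) d).getD k 0 = d.getD k 0 - ks.count k := by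
  intro ks
  induction ks with
  | nil => simp
  | cons x ks ih =>
    intro d k
    rw [List.foldl_cons, ih, PySem.Dict.getD_modify]
    by_cases hk : k = x <;> simp [hk, List.count_cons] <;> omega

theorem pvKeys_foldl_sub : ∀ (ks : List Int) (d : PySem.Dict Int Int),
    (∀ x ∈ ks, d.contains x = true) →
    (ks.foldl (fun d x => d.modify x 0 (· - 1)) d).keys = d.keys := by
  intro ks
  induction ks with
  | nil => simp
  | cons x ks ih =>
    intro d h
    rw [List.foldl_cons, ih, PySem.Dict.keys_modify, PySem.Dict.keys_insert_of_contains _ _ (h x (by simp))]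
    intro y hy
    rw [PySem.Dict.contains_modify]
    simp [h y (by simp [hy])]

-- one round's row, computed from pvDec, is pvRow
theorem pvRow_pvDec (nums : List Int) (n : Nat) :
    (((pvDec nums n).items.filter (fun p => 0 < p.2)).map (·.1)) = pvRow nums n := by
  rw [pvItems_pvDec, List.filter_map, List.map_map]
  rw [show ((fun (x : Int × Int) => x.1) ∘ fun k => (k, max ((nums.count k : Int) - n) 0)) = id by rfl, List.map_id]
  apply List.filter_congr
  intro k _
  simp only [Function.comp_apply, decide_eq_decide]
  omega

-- one round's decrement step sends pvDec n to pvDec (n+1)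
theorem pvDec_step (nums : List Int) (n : Nat) :
    (pvRow nums n).foldl (fun d num => d.modify num 0 (· - 1)) (pvDec nums n) = pvDec nums (n + 1) := by
  have hkeys0 : (pvDec nums n).keys = PySem.Set.ofList nums := pvKeys_pvDec nums n
  have hnd0 : (pvDec nums n).keys.Nodup := by rw [hkeys0]; exact PySem.Set.nodup_ofList nums
  have hmemrow : ∀ x ∈ pvRow nums n, x ∈ PySem.Set.ofList nums := by
    intro x hx; exact List.mem_of_mem_filter hx
  have hkeys : ((pvRow nums n).foldl (fun d num => d.modify num 0 (· - 1)) (pvDec nums n)).keys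
      = PySem.Set.ofList nums := by
    rw [pvKeys_foldl_sub _ _ ?_, hkeys0]
    intro x hx
    rw [PySem.Dict.contains_iff_mem_keys, hkeys0]
    · exact hmemrow x hx
  have hnd : ((pvRow nums n).foldl (fun d num => d.modify num 0 (· - 1)) (pvDec nums n)).keys.Nodup := by
    rw [hkeys]; exact PySem.Set.nodup_ofList nums
  apply PySem.Dict.ext
  rw [PySem.Dict.items_eq_map_keys _ hnd 0, hkeys, pvItems_pvDec]
  apply List.map_congr_left
  intro k hk
  rw [pvGetD_foldl_sub]
  have hget0 : (pvDec nums n).getD k 0 = max ((nums.count k : Int) - n) 0 := by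
    apply PySem.Dict.getD_of_mem_items _ _ hnd0
    rw [pvItems_pvDec]
    exact List.mem_map_of_mem hk
  have hcnt : ((pvRow nums n).count k : Int) = if (n : Int) < (nums.count k : Int) then 1 else 0 := by
    by_cases hin : k ∈ pvRow nums n
    · have hndrow : (pvRow nums n).Nodup := (PySem.Set.nodup_ofList nums).filter _
      rw [List.count_eq_one_of_mem hndrow hin]
      have : (n : Int) < (nums.count k : Int) := by
        have := List.of_mem_filter hin
        simpa using this
      simp [this]
    · rw [List.count_eq_zero.mpr hin]
      have : ¬ (n : Int) < (nums.count k : Int) := by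
        intro hlt
        exact hin (List.mem_filter.mpr ⟨hk, by simpa using hlt⟩)
      simp [this]
  rw [hget0, hcnt]
  have : (0:Int) ≤ (nums.count k : Int) := by positivity
  split_ifs <;> (apply Prod.ext <;> simp <;> omega)

theorem pvCounter_eq_pvDec0 (nums : List Int) : PySem.Dict.counter nums = pvDec nums 0 := by
  apply PySem.Dict.ext
  rw [PySem.Dict.items_counter, pvItems_pvDec]
  apply List.map_congr_left
  intro k _
  have : (0:Int) ≤ (nums.count k : Int) := by positivity
  apply Prod.ext <;> simp <;> omega

theorem pvBloop (nums : List Int) : ∀ (n : Nat),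
    (PySem.List.pyRange 0 (n : Int) 1).foldl
      (fun (st : List (List Int) × PySem.Dict Int Int) _ =>
        let row := (st.2.items.filter (fun p => 0 < p.2)).map (·.1)
        (st.1 ++ [row], row.foldl (fun d num => d.modify num 0 (· - 1)) st.2))
      ([], pvDec nums 0)
    = (pvRows nums n, pvDec nums n) := by
  intro n
  induction n with
  | zero => simp [pvRows]
  | succ n ih =>
    rw [show ((n + 1 : Nat) : Int) = (n : Int) + 1 by push_cast; ring,
        PySem.List.pyRange_one_succ_right (show (0:Int) ≤ (n:Int) by omega), List.foldl_append,
        ih, List.foldl_cons, List.foldl_nil]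
    show (pvRows nums n ++ [_], _) = _
    rw [pvRow_pvDec, pvDec_step]
    apply Prod.ext
    · show pvRows nums n ++ [pvRow nums n] = pvRows nums (n + 1)
      simp [pvRows, List.range_succ]
    · rfl

theorem pvLemB (nums : List Int) (mf : Int)
    (hmax : PySem.List.max? (PySem.Dict.counter nums).values (fun v => v) = some mf) :
    findMatrix_alt nums = pvRows nums mf.toNat := by
  have hvals : (PySem.Dict.counter nums).values
      = (PySem.Set.ofList nums).map (fun k => ((nums.count k : Int))) := by
    show (PySem.Dict.counter nums).items.map (·.2) = _
    rw [PySem.Dict.items_counter, List.map_map]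
    rfl
  have h0mf : 0 ≤ mf := by
    have hm := PySem.List.max?_mem hmax
    rw [hvals] at hm
    obtain ⟨k, _, hk⟩ := List.mem_map.mp hm
    subst hk
    positivity
  simp only [findMatrix_alt, PySem.Dict.foldl_insert_getD_add_one_eq_counter, hmax]
  rw [pvCounter_eq_pvDec0, show mf = ((mf.toNat : Nat) : Int) by omega, pvBloop]
  show pvRows nums _ = _
  congr 1

-- ===== VERDICT (by name: the statement is the Claim_ definition above) =====
theorem findMatrix_spec : Claim_equal_findMatrix := by
  intro nums _ hpre
  unfold Spec_findMatrix
  cases hmax : PySem.List.max? (PySem.Dict.counter nums).values (fun v => v) with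
  | none =>
    exfalso
    have hvals := (PySem.List.max?_eq_none_iff _ _).mp hmax
    have hitems : (PySem.Dict.counter nums).items = [] := by
      have : (PySem.Dict.counter nums).items.map (·.2) = [] := hvals
      exact List.map_eq_nil_iff.mp this
    rw [PySem.Dict.items_counter] at hitems
    have hset : PySem.Set.ofList nums = [] := List.map_eq_nil_iff.mp hitems
    match nums, hpre with
    | x :: xs, _ =>
      have : x ∈ PySem.Set.ofList (x :: xs) := (PySem.Set.mem_ofList _ _).mpr (by simp)
      rw [hset] at this
      exact (List.not_mem_nil) this
  | some mf =>
    rw [pvLemA nums mf hmax, pvLemB nums mf hmax]
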